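-- pv_equiv track=rewrite | github.com/xXKlaskpffXx/Advent-of-Code | 2023/Day 1/Solution P2.py | istnumericV
-- ===== SOURCE A (Python) =====
-- digitsl = ["one", "two", "three", "four", "five", "six", "seven", "eight", "nine"]
--
-- digitsn = ["1","2","3","4","5","6","7","8","9"]
--
-- def istnumericV(x):
--     y = ''
--     i = -1
--     for j in range(len(list(x))+1):
--         i += 1
--         if digitsl[0] in x[0:i] or digitsn[0] in x[0:i]:
--             return '1'
--         if digitsl[1] in x[0:i] or digitsn[1] in x[0:i]:
--             return '2'
--         if digitsl[2] in x[0:i] or digitsn[2] in x[0:i]: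
--             return '3'
--         if digitsl[3] in x[0:i] or digitsn[3] in x[0:i]:
--             return '4'
--         if digitsl[4] in x[0:i] or digitsn[4] in x[0:i]:
--             return '5'
--         if digitsl[5] in x[0:i] or digitsn[5] in x[0:i]:
--             return '6'
--         if digitsl[6] in x[0:i] or digitsn[6] in x[0:i]:
--             return '7'
--         if digitsl[7] in x[0:i] or digitsn[7] in x[0:i]:
--             return '8'
--         if digitsl[8] in x[0:i] or digitsn[8] in x[0:i]:
--             return '9'
-- ===== SOURCE B (Python) =====
-- _WORDS = ["one", "two", "three", "four", "five", "six", "seven", "eight", "nine"]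
--
-- def istnumericV(x):
--     # single left-to-right scan: first position where a digit word or numeral
--     # ends; among matches ending there, the smallest digit value
--     n = len(x)
--     for e in range(1, n + 1):
--         cands = []
--         c = x[e - 1]
--         if '1' <= c <= '9':
--             cands.append(ord(c) - 48)
--         for d in range(1, 10):
--             w = _WORDS[d - 1]
--             if len(w) <= e and x[e - len(w):e] == w:
--                 cands.append(d)
--         if cands:
--             return str(min(cands))
--     return None
-- ===== Notes on version B (the rewrite author's own statement) =====
-- stated objective: faster
-- what changed: A rescans every growing prefix x[0:i] for all 18 digit-word/numeral substrings (repeated 'in' scans); B makes a single left-to-right pass over end positions, collecting the digits whose word or numeral ends exactly there and returning the smallest one at the first such position.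
import Mathlib
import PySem

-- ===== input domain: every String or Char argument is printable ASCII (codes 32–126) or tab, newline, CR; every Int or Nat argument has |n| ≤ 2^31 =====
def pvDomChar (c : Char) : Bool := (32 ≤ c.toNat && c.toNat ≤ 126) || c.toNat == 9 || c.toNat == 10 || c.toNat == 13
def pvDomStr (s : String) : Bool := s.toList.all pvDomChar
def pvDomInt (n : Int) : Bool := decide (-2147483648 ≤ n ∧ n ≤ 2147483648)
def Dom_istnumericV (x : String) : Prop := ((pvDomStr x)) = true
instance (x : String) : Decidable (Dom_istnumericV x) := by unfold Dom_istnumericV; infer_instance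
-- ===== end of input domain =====

-- B replaces A's quadratic grow-the-prefix substring rescans by a single left-to-right
-- scan over end positions, collecting the digit words/numerals that end there (objective: faster).


-- ===== PORT A =====
def digitsl : List (List Char) :=
  ["one".toList, "two".toList, "three".toList, "four".toList, "five".toList,
   "six".toList, "seven".toList, "eight".toList, "nine".toList]

def digitsn : List (List Char) :=
  ["1".toList, "2".toList, "3".toList, "4".toList, "5".toList,
   "6".toList, "7".toList, "8".toList, "9".toList]

-- the for-loop over range(len(list(x))+1), with the running index i as state
def pvALoop (x : List Char) (i : Int) : List Int → Option String
  | [] => none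
  | _j :: js =>
    let i' := i + 1
    let p := PySem.List.slice x (some 0) (some i')
    if PySem.Chars.isIn (PySem.List.pyGetD digitsl 0 []) p || PySem.Chars.isIn (PySem.List.pyGetD digitsn 0 []) p then some "1"
    else if PySem.Chars.isIn (PySem.List.pyGetD digitsl 1 []) p || PySem.Chars.isIn (PySem.List.pyGetD digitsn 1 []) p then some "2"
    else if PySem.Chars.isIn (PySem.List.pyGetD digitsl 2 []) p || PySem.Chars.isIn (PySem.List.pyGetD digitsn 2 []) p then some "3"
    else if PySem.Chars.isIn (PySem.List.pyGetD digitsl 3 []) p || PySem.Chars.isIn (PySem.List.pyGetD digitsn 3 []) p then some "4"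
    else if PySem.Chars.isIn (PySem.List.pyGetD digitsl 4 []) p || PySem.Chars.isIn (PySem.List.pyGetD digitsn 4 []) p then some "5"
    else if PySem.Chars.isIn (PySem.List.pyGetD digitsl 5 []) p || PySem.Chars.isIn (PySem.List.pyGetD digitsn 5 []) p then some "6"
    else if PySem.Chars.isIn (PySem.List.pyGetD digitsl 6 []) p || PySem.Chars.isIn (PySem.List.pyGetD digitsn 6 []) p then some "7"
    else if PySem.Chars.isIn (PySem.List.pyGetD digitsl 7 []) p || PySem.Chars.isIn (PySem.List.pyGetD digitsn 7 []) p then some "8"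
    else if PySem.Chars.isIn (PySem.List.pyGetD digitsl 8 []) p || PySem.Chars.isIn (PySem.List.pyGetD digitsn 8 []) p then some "9"
    else pvALoop x i' js

def istnumericV (x : String) : Option String :=
  pvALoop x.toList (-1) (PySem.List.pyRange 0 ((x.toList.length : Int) + 1) 1)

-- ===== PORT B =====
def pvWords : List (List Char) :=
  ["one".toList, "two".toList, "three".toList, "four".toList, "five".toList,
   "six".toList, "seven".toList, "eight".toList, "nine".toList]

-- the digits (as values) whose word or numeral ends exactly at position e (1-based)
def pvBCands (x : List Char) (e : Int) : List Int :=
  let c := PySem.List.pyGetD x (e - 1) ' '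
  let base : List Int := if '1' ≤ c ∧ c ≤ '9' then [(c.toNat : Int) - 48] else []
  (PySem.List.pyRange 1 10 1).foldl
    (fun acc d =>
      let w := PySem.List.pyGetD pvWords (d - 1) []
      if (w.length : Int) ≤ e ∧ PySem.List.slice x (some (e - (w.length : Int))) (some e) = w
      then acc ++ [d] else acc) base

def pvBLoop (x : List Char) : List Int → Option String
  | [] => none
  | e :: es =>
    match PySem.List.min? (pvBCands x e) (fun y => y) with
    | some m => some (PySem.Int.toStr m)
    | none => pvBLoop x es

def istnumericV_alt (x : String) : Option String :=
  pvBLoop x.toList (PySem.List.pyRange 1 ((x.toList.length : Int) + 1) 1)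

-- ===== PRECONDITION & SPEC =====
def Spec_istnumericV (x : String) (out : Option String) : Prop := out = istnumericV_alt x
instance (x : String) (out : Option String) : Decidable (Spec_istnumericV x out) := by unfold Spec_istnumericV; infer_instance

-- ===== CLAIM (what is proved, stated in full; the proofs are below) =====
def Claim_equal_istnumericV : Prop := ∀ (x : String), Dom_istnumericV x → Spec_istnumericV x (istnumericV x)

-- ===== LEMMAS AND PROOFS =====

-- all 18 patterns A searches for
def pvPats : List (List Char) := digitsl ++ digitsn

def pvNoHit (x : List Char) (i : Nat) : Prop := ∀ p ∈ pvPats, ¬ p <:+: x.take i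

theorem pv_infix_concat_iff {α : Type} (w l : List α) (a : α) :
    w <:+: l ++ [a] ↔ w <:+: l ∨ w <:+ l ++ [a] := by
  constructor
  · rintro ⟨s, t, h⟩
    rcases t.eq_nil_or_concat with rfl | ⟨t', b, rfl⟩
    · right; exact ⟨s, by simpa using h⟩
    · left
      rw [List.concat_eq_append] at h
      have h2 : (s ++ w ++ t') ++ [b] = l ++ [a] := by simpa using h
      have := List.append_inj' h2 rfl
      exact ⟨s, t', this.1⟩
  · rintro (h | h)
    · exact h.trans ⟨[], [a], by simp⟩
    · exact h.isInfix

theorem pv_take_split (x : List Char) (e : Nat) (h1 : 1 ≤ e) (he : e ≤ x.length) :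
    x.take e = x.take (e - 1) ++ [x.getD (e - 1) ' '] := by
  have h : e - 1 < x.length := by omega
  have h2 : e = (e - 1) + 1 := by omega
  conv_lhs => rw [h2]
  rw [List.take_add_one, List.getElem?_eq_getElem h, List.getD_eq_getElem _ _ h]
  rfl

theorem pv_sing_suffix (x : List Char) (e : Nat) (c : Char) (h1 : 1 ≤ e) (he : e ≤ x.length) :
    [c] <:+ x.take e ↔ x.getD (e - 1) ' ' = c := by
  rw [pv_take_split x e h1 he]
  constructor
  · intro h
    rcases h with ⟨s, hs⟩
    have := List.append_inj' hs rfl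
    simpa using this.2.symm
  · rintro rfl
    exact ⟨_, rfl⟩

theorem pv_slice_suffix (x : List Char) (e : Nat) (w : List Char) (he : e ≤ x.length) :
    ((w.length : Int) ≤ (e : Int) ∧
      PySem.List.slice x (some ((e : Int) - (w.length : Int))) (some (e : Int)) = w)
    ↔ w <:+ x.take e := by
  have hlen : (x.take e).length = e := by simp; omega
  by_cases hL : w.length ≤ e
  · have hc : ((e : Int) - (w.length : Int)) = ((e - w.length : Nat) : Int) := by omega
    have h2 : e - (e - w.length) = w.length := by omega
    have key : List.drop (e - w.length) (x.take e) = (x.drop (e - w.length)).take w.length := by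
      rw [List.drop_take]
      congr 1
    rw [hc, PySem.List.slice_natCast, h2, List.suffix_iff_eq_drop, hlen, key]
    exact ⟨fun ⟨_, hs⟩ => hs.symm, fun hs => ⟨by exact_mod_cast hL, hs.symm⟩⟩
  · constructor
    · rintro ⟨hLe, -⟩; exact absurd (by exact_mod_cast hLe) hL
    · intro hs
      exact absurd (hlen ▸ hs.length_le) hL

theorem pv_isIn_step (x : List Char) (e : Nat) (w : List Char) (h1 : 1 ≤ e) (he : e ≤ x.length)
    (hNo : ¬ w <:+: x.take (e - 1)) :
    PySem.Chars.isIn w (x.take e) = decide (w <:+ x.take e) := by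
  by_cases h : w <:+: x.take e
  · have hsuf : w <:+ x.take e := by
      rw [pv_take_split x e h1 he] at h
      rcases (pv_infix_concat_iff _ _ _).mp h with h' | h'
      · exact absurd h' hNo
      · rw [← pv_take_split x e h1 he] at h'
        exact h'
    simp [(PySem.Chars.isIn_iff_infix w _).mpr h, hsuf]
  · have hns : ¬ w <:+ x.take e := fun hs => h hs.isInfix
    simp [(PySem.Chars.isIn_eq_false_iff w _).mpr h, hns]

theorem pv_nohit_succ (x : List Char) (e : Nat) (h1 : 1 ≤ e) (he : e ≤ x.length) (w : List Char)
    (hno : ¬ w <:+: x.take (e - 1)) (hns : ¬ w <:+ x.take e) : ¬ w <:+: x.take e := by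
  intro h
  rw [pv_take_split x e h1 he] at h
  rcases (pv_infix_concat_iff _ _ _).mp h with h' | h'
  · exact hno h'
  · rw [← pv_take_split x e h1 he] at h'
    exact hns h'

theorem pv_char_toNat_inj (a b : Char) (h : a.toNat = b.toNat) : a = b :=
  Char.ext (UInt32.toNat_inj.mp h)

theorem pv_char_digit_cases (c : Char) (h : '1' ≤ c ∧ c ≤ '9') :
    c = '1' ∨ c = '2' ∨ c = '3' ∨ c = '4' ∨ c = '5' ∨ c = '6' ∨ c = '7' ∨ c = '8' ∨ c = '9' := by
  have h1 : (49 : Nat) ≤ c.toNat := h.1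
  have h2 : c.toNat ≤ (57 : Nat) := h.2
  have : c.toNat = 49 ∨ c.toNat = 50 ∨ c.toNat = 51 ∨ c.toNat = 52 ∨ c.toNat = 53 ∨
      c.toNat = 54 ∨ c.toNat = 55 ∨ c.toNat = 56 ∨ c.toNat = 57 := by omega
  rcases this with h' | h' | h' | h' | h' | h' | h' | h' | h'
  · exact Or.inl (pv_char_toNat_inj c '1' h')
  · exact Or.inr (Or.inl (pv_char_toNat_inj c '2' h'))
  · exact Or.inr (Or.inr (Or.inl (pv_char_toNat_inj c '3' h')))
  · exact Or.inr (Or.inr (Or.inr (Or.inl (pv_char_toNat_inj c '4' h'))))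
  · exact Or.inr (Or.inr (Or.inr (Or.inr (Or.inl (pv_char_toNat_inj c '5' h')))))
  · exact Or.inr (Or.inr (Or.inr (Or.inr (Or.inr (Or.inl (pv_char_toNat_inj c '6' h'))))))
  · exact Or.inr (Or.inr (Or.inr (Or.inr (Or.inr (Or.inr (Or.inl (pv_char_toNat_inj c '7' h')))))))
  · exact Or.inr (Or.inr (Or.inr (Or.inr (Or.inr (Or.inr (Or.inr (Or.inl (pv_char_toNat_inj c '8' h'))))))))
  · exact Or.inr (Or.inr (Or.inr (Or.inr (Or.inr (Or.inr (Or.inr (Or.inr (pv_char_toNat_inj c '9' h'))))))))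

theorem pv_word_suffix_last (x : List Char) (e : Nat) (h1 : 1 ≤ e) (he : e ≤ x.length)
    (w : List Char) (l : Char) (hwl : w.getLast? = some l) (hs : w <:+ x.take e) :
    x.getD (e - 1) ' ' = l := by
  rcases List.getLast?_eq_some_iff.mp hwl with ⟨ys, rfl⟩
  exact (pv_sing_suffix x e l h1 he).mp ((List.suffix_append ys [l]).trans hs)

-- characterisation of B's candidate list
theorem pv_cands_eq (x : List Char) (e : Nat) (h1 : 1 ≤ e) (he : e ≤ x.length) :
    pvBCands x (e : Int) =
      (if '1' ≤ x.getD (e - 1) ' ' ∧ x.getD (e - 1) ' ' ≤ '9'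
        then [((x.getD (e - 1) ' ').toNat : Int) - 48] else [])
      ++ ([1, 2, 3, 4, 5, 6, 7, 8, 9] : List Int).filter
          (fun d => decide ((pvWords.getD (d - 1).toNat []) <:+ x.take e)) := by
  unfold pvBCands
  have hc : ((e : Int) - 1) = ((e - 1 : Nat) : Int) := by omega
  have hr : PySem.List.pyRange 1 10 1 = [1,2,3,4,5,6,7,8,9] := by decide
  rw [hc, PySem.List.pyGetD_natCast, hr]
  rw [PySem.List.foldl_congr_mem _ _
      (fun acc d => if (fun d => decide ((pvWords.getD (d - 1).toNat []) <:+ x.take e)) d = true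
        then acc ++ [(fun (d : Int) => d) d] else acc) _
      ?_]
  · rw [PySem.List.foldl_append_if]
    simp
  · intro acc d hd
    have hiff := fun (w : List Char) => pv_slice_suffix x e w he
    fin_cases hd <;>
      simp only [show PySem.List.pyGetD pvWords (1 - 1) [] = "one".toList from rfl,
        show PySem.List.pyGetD pvWords (2 - 1) [] = "two".toList from rfl,
        show PySem.List.pyGetD pvWords (3 - 1) [] = "three".toList from rfl,
        show PySem.List.pyGetD pvWords (4 - 1) [] = "four".toList from rfl,
        show PySem.List.pyGetD pvWords (5 - 1) [] = "five".toList from rfl,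
        show PySem.List.pyGetD pvWords (6 - 1) [] = "six".toList from rfl,
        show PySem.List.pyGetD pvWords (7 - 1) [] = "seven".toList from rfl,
        show PySem.List.pyGetD pvWords (8 - 1) [] = "eight".toList from rfl,
        show PySem.List.pyGetD pvWords (9 - 1) [] = "nine".toList from rfl,
        show ((1:Int) - 1).toNat = 0 from rfl, show ((2:Int) - 1).toNat = 1 from rfl,
        show ((3:Int) - 1).toNat = 2 from rfl, show ((4:Int) - 1).toNat = 3 from rfl,
        show ((5:Int) - 1).toNat = 4 from rfl, show ((6:Int) - 1).toNat = 5 from rfl,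
        show ((7:Int) - 1).toNat = 6 from rfl, show ((8:Int) - 1).toNat = 7 from rfl,
        show ((9:Int) - 1).toNat = 8 from rfl,
        show pvWords.getD 0 [] = "one".toList from rfl,
        show pvWords.getD 1 [] = "two".toList from rfl,
        show pvWords.getD 2 [] = "three".toList from rfl,
        show pvWords.getD 3 [] = "four".toList from rfl,
        show pvWords.getD 4 [] = "five".toList from rfl,
        show pvWords.getD 5 [] = "six".toList from rfl,
        show pvWords.getD 6 [] = "seven".toList from rfl,
        show pvWords.getD 7 [] = "eight".toList from rfl,
        show pvWords.getD 8 [] = "nine".toList from rfl,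
        hiff, decide_eq_true_eq]

def pvQ (b1 b2 b3 b4 b5 b6 b7 b8 b9 : Bool) : Int → Bool := fun d =>
  if d = 1 then b1 else if d = 2 then b2 else if d = 3 then b3 else if d = 4 then b4
  else if d = 5 then b5 else if d = 6 then b6 else if d = 7 then b7 else if d = 8 then b8
  else if d = 9 then b9 else false

theorem pv_key (b1 b2 b3 b4 b5 b6 b7 b8 b9 : Bool) (R S : Option String)
    (h : (b1 || b2 || b3 || b4 || b5 || b6 || b7 || b8 || b9) = true) :
    (if b1 = true then some "1" else if b2 = true then some "2" else if b3 = true then some "3"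
     else if b4 = true then some "4" else if b5 = true then some "5" else if b6 = true then some "6"
     else if b7 = true then some "7" else if b8 = true then some "8" else if b9 = true then some "9"
     else R)
    = (match PySem.List.min? (List.filter (pvQ b1 b2 b3 b4 b5 b6 b7 b8 b9) ([1,2,3,4,5,6,7,8,9] : List Int)) (fun y => y) with
       | some m => some (PySem.Int.toStr m)
       | none => S) := by
  cases b1 <;> cases b2 <;> cases b3 <;> cases b4 <;> cases b5 <;> cases b6 <;> cases b7 <;>
    cases b8 <;> cases b9 <;> first | rfl | (exact absurd h (by decide))

theorem pv_main (x : List Char) (m : Nat) : ∀ e : Nat, e + m = x.length + 1 → 1 ≤ e →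
    pvNoHit x (e - 1) →
    pvALoop x ((e : Int) - 1) (PySem.List.pyRange e ((x.length : Int) + 1) 1) =
    pvBLoop x (PySem.List.pyRange e ((x.length : Int) + 1) 1) := by
  induction m with
  | zero =>
    intro e hm h1 _
    rw [PySem.List.pyRange_one_eq_nil (by omega : ((x.length : Int) + 1) ≤ (e : Int))]
    rfl
  | succ m ih =>
    intro e hm h1 hNo
    have he : e ≤ x.length := by omega
    rw [PySem.List.pyRange_one_cons (by omega : (e : Int) < (x.length : Int) + 1)]
    simp only [pvALoop, pvBLoop]
    have hi : ((e : Int) - 1 + 1) = ((e : Nat) : Int) := by ring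
    rw [hi]
    have hp : PySem.List.slice x (some 0) (some ((e : Nat) : Int)) = x.take e := by
      rw [PySem.List.slice_zero_start, PySem.List.slice_to_natCast]
    rw [hp]
    simp only [show PySem.List.pyGetD digitsl 0 [] = "one".toList from rfl,
      show PySem.List.pyGetD digitsl 1 [] = "two".toList from rfl,
      show PySem.List.pyGetD digitsl 2 [] = "three".toList from rfl,
      show PySem.List.pyGetD digitsl 3 [] = "four".toList from rfl,
      show PySem.List.pyGetD digitsl 4 [] = "five".toList from rfl,
      show PySem.List.pyGetD digitsl 5 [] = "six".toList from rfl,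
      show PySem.List.pyGetD digitsl 6 [] = "seven".toList from rfl,
      show PySem.List.pyGetD digitsl 7 [] = "eight".toList from rfl,
      show PySem.List.pyGetD digitsl 8 [] = "nine".toList from rfl,
      show PySem.List.pyGetD digitsn 0 [] = ['1'] from rfl,
      show PySem.List.pyGetD digitsn 1 [] = ['2'] from rfl,
      show PySem.List.pyGetD digitsn 2 [] = ['3'] from rfl,
      show PySem.List.pyGetD digitsn 3 [] = ['4'] from rfl,
      show PySem.List.pyGetD digitsn 4 [] = ['5'] from rfl,
      show PySem.List.pyGetD digitsn 5 [] = ['6'] from rfl,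
      show PySem.List.pyGetD digitsn 6 [] = ['7'] from rfl,
      show PySem.List.pyGetD digitsn 7 [] = ['8'] from rfl,
      show PySem.List.pyGetD digitsn 8 [] = ['9'] from rfl]
    rw [pv_isIn_step x e "one".toList h1 he (hNo _ (by decide)),
      pv_isIn_step x e "two".toList h1 he (hNo _ (by decide)),
      pv_isIn_step x e "three".toList h1 he (hNo _ (by decide)),
      pv_isIn_step x e "four".toList h1 he (hNo _ (by decide)),
      pv_isIn_step x e "five".toList h1 he (hNo _ (by decide)),
      pv_isIn_step x e "six".toList h1 he (hNo _ (by decide)),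
      pv_isIn_step x e "seven".toList h1 he (hNo _ (by decide)),
      pv_isIn_step x e "eight".toList h1 he (hNo _ (by decide)),
      pv_isIn_step x e "nine".toList h1 he (hNo _ (by decide)),
      pv_isIn_step x e ['1'] h1 he (hNo _ (by decide)),
      pv_isIn_step x e ['2'] h1 he (hNo _ (by decide)),
      pv_isIn_step x e ['3'] h1 he (hNo _ (by decide)),
      pv_isIn_step x e ['4'] h1 he (hNo _ (by decide)),
      pv_isIn_step x e ['5'] h1 he (hNo _ (by decide)),
      pv_isIn_step x e ['6'] h1 he (hNo _ (by decide)),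
      pv_isIn_step x e ['7'] h1 he (hNo _ (by decide)),
      pv_isIn_step x e ['8'] h1 he (hNo _ (by decide)),
      pv_isIn_step x e ['9'] h1 he (hNo _ (by decide))]
    rw [pv_cands_eq x e h1 he]
    have S1 : decide (['1'] <:+ x.take e) = decide (x.getD (e - 1) ' ' = '1') :=
      decide_eq_decide.mpr (pv_sing_suffix x e '1' h1 he)
    have S2 : decide (['2'] <:+ x.take e) = decide (x.getD (e - 1) ' ' = '2') :=
      decide_eq_decide.mpr (pv_sing_suffix x e '2' h1 he)
    have S3 : decide (['3'] <:+ x.take e) = decide (x.getD (e - 1) ' ' = '3') :=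
      decide_eq_decide.mpr (pv_sing_suffix x e '3' h1 he)
    have S4 : decide (['4'] <:+ x.take e) = decide (x.getD (e - 1) ' ' = '4') :=
      decide_eq_decide.mpr (pv_sing_suffix x e '4' h1 he)
    have S5 : decide (['5'] <:+ x.take e) = decide (x.getD (e - 1) ' ' = '5') :=
      decide_eq_decide.mpr (pv_sing_suffix x e '5' h1 he)
    have S6 : decide (['6'] <:+ x.take e) = decide (x.getD (e - 1) ' ' = '6') :=
      decide_eq_decide.mpr (pv_sing_suffix x e '6' h1 he)
    have S7 : decide (['7'] <:+ x.take e) = decide (x.getD (e - 1) ' ' = '7') :=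
      decide_eq_decide.mpr (pv_sing_suffix x e '7' h1 he)
    have S8 : decide (['8'] <:+ x.take e) = decide (x.getD (e - 1) ' ' = '8') :=
      decide_eq_decide.mpr (pv_sing_suffix x e '8' h1 he)
    have S9 : decide (['9'] <:+ x.take e) = decide (x.getD (e - 1) ' ' = '9') :=
      decide_eq_decide.mpr (pv_sing_suffix x e '9' h1 he)
    rw [S1, S2, S3, S4, S5, S6, S7, S8, S9]
    by_cases hd : '1' ≤ x.getD (e - 1) ' ' ∧ x.getD (e - 1) ' ' ≤ '9'
    · -- a numeral ends at e: no word can end there (its last char is a letter)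
      have hW : ∀ w ∈ pvWords, ¬ w <:+ x.take e := by
        intro w hw hs
        fin_cases hw
        · have hl := pv_word_suffix_last x e h1 he _ 'e' (by decide) hs
          rw [hl] at hd; exact absurd hd (by decide)
        · have hl := pv_word_suffix_last x e h1 he _ 'o' (by decide) hs
          rw [hl] at hd; exact absurd hd (by decide)
        · have hl := pv_word_suffix_last x e h1 he _ 'e' (by decide) hs
          rw [hl] at hd; exact absurd hd (by decide)
        · have hl := pv_word_suffix_last x e h1 he _ 'r' (by decide) hs
          rw [hl] at hd; exact absurd hd (by decide)
        · have hl := pv_word_suffix_last x e h1 he _ 'e' (by decide) hs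
          rw [hl] at hd; exact absurd hd (by decide)
        · have hl := pv_word_suffix_last x e h1 he _ 'x' (by decide) hs
          rw [hl] at hd; exact absurd hd (by decide)
        · have hl := pv_word_suffix_last x e h1 he _ 'n' (by decide) hs
          rw [hl] at hd; exact absurd hd (by decide)
        · have hl := pv_word_suffix_last x e h1 he _ 't' (by decide) hs
          rw [hl] at hd; exact absurd hd (by decide)
        · have hl := pv_word_suffix_last x e h1 he _ 'e' (by decide) hs
          rw [hl] at hd; exact absurd hd (by decide)
      have W1 : decide ("one".toList <:+ x.take e) = false := decide_eq_false (hW _ (by decide))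
      have W2 : decide ("two".toList <:+ x.take e) = false := decide_eq_false (hW _ (by decide))
      have W3 : decide ("three".toList <:+ x.take e) = false := decide_eq_false (hW _ (by decide))
      have W4 : decide ("four".toList <:+ x.take e) = false := decide_eq_false (hW _ (by decide))
      have W5 : decide ("five".toList <:+ x.take e) = false := decide_eq_false (hW _ (by decide))
      have W6 : decide ("six".toList <:+ x.take e) = false := decide_eq_false (hW _ (by decide))
      have W7 : decide ("seven".toList <:+ x.take e) = false := decide_eq_false (hW _ (by decide))
      have W8 : decide ("eight".toList <:+ x.take e) = false := decide_eq_false (hW _ (by decide))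
      have W9 : decide ("nine".toList <:+ x.take e) = false := decide_eq_false (hW _ (by decide))
      rcases pv_char_digit_cases (x.getD (e - 1) ' ') hd with hc | hc | hc | hc | hc | hc | hc | hc | hc <;>
        (simp only [hc]
         simp only [List.filter_cons, List.filter_nil,
            show ((1:Int) - 1).toNat = 0 from rfl, show ((2:Int) - 1).toNat = 1 from rfl,
            show ((3:Int) - 1).toNat = 2 from rfl, show ((4:Int) - 1).toNat = 3 from rfl,
            show ((5:Int) - 1).toNat = 4 from rfl, show ((6:Int) - 1).toNat = 5 from rfl,
            show ((7:Int) - 1).toNat = 6 from rfl, show ((8:Int) - 1).toNat = 7 from rfl,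
            show ((9:Int) - 1).toNat = 8 from rfl,
            show pvWords.getD 0 [] = "one".toList from rfl,
            show pvWords.getD 1 [] = "two".toList from rfl,
            show pvWords.getD 2 [] = "three".toList from rfl,
            show pvWords.getD 3 [] = "four".toList from rfl,
            show pvWords.getD 4 [] = "five".toList from rfl,
            show pvWords.getD 5 [] = "six".toList from rfl,
            show pvWords.getD 6 [] = "seven".toList from rfl,
            show pvWords.getD 7 [] = "eight".toList from rfl,
            show pvWords.getD 8 [] = "nine".toList from rfl,
            W1, W2, W3, W4, W5, W6, W7, W8, W9]
         rfl)
    · -- no numeral ends at e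
      have N1 : decide (x.getD (e - 1) ' ' = '1') = false := decide_eq_false (fun h => hd (by rw [h]; exact ⟨by decide, by decide⟩))
      have N2 : decide (x.getD (e - 1) ' ' = '2') = false := decide_eq_false (fun h => hd (by rw [h]; exact ⟨by decide, by decide⟩))
      have N3 : decide (x.getD (e - 1) ' ' = '3') = false := decide_eq_false (fun h => hd (by rw [h]; exact ⟨by decide, by decide⟩))
      have N4 : decide (x.getD (e - 1) ' ' = '4') = false := decide_eq_false (fun h => hd (by rw [h]; exact ⟨by decide, by decide⟩))
      have N5 : decide (x.getD (e - 1) ' ' = '5') = false := decide_eq_false (fun h => hd (by rw [h]; exact ⟨by decide, by decide⟩))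
      have N6 : decide (x.getD (e - 1) ' ' = '6') = false := decide_eq_false (fun h => hd (by rw [h]; exact ⟨by decide, by decide⟩))
      have N7 : decide (x.getD (e - 1) ' ' = '7') = false := decide_eq_false (fun h => hd (by rw [h]; exact ⟨by decide, by decide⟩))
      have N8 : decide (x.getD (e - 1) ' ' = '8') = false := decide_eq_false (fun h => hd (by rw [h]; exact ⟨by decide, by decide⟩))
      have N9 : decide (x.getD (e - 1) ' ' = '9') = false := decide_eq_false (fun h => hd (by rw [h]; exact ⟨by decide, by decide⟩))
      rw [if_neg hd]
      simp only [N1, N2, N3, N4, N5, N6, N7, N8, N9, Bool.or_false, List.nil_append]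
      have hfc : List.filter (fun d => decide ((pvWords.getD (d - 1).toNat []) <:+ x.take e))
            ([1,2,3,4,5,6,7,8,9] : List Int)
          = List.filter (pvQ (decide ("one".toList <:+ x.take e)) (decide ("two".toList <:+ x.take e))
              (decide ("three".toList <:+ x.take e)) (decide ("four".toList <:+ x.take e))
              (decide ("five".toList <:+ x.take e)) (decide ("six".toList <:+ x.take e))
              (decide ("seven".toList <:+ x.take e)) (decide ("eight".toList <:+ x.take e))
              (decide ("nine".toList <:+ x.take e))) ([1,2,3,4,5,6,7,8,9] : List Int) := by
        refine List.filter_congr ?_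
        intro d hd'
        fin_cases hd' <;> rfl
      rw [hfc]
      by_cases hor : (decide ("one".toList <:+ x.take e) || decide ("two".toList <:+ x.take e) ||
          decide ("three".toList <:+ x.take e) || decide ("four".toList <:+ x.take e) ||
          decide ("five".toList <:+ x.take e) || decide ("six".toList <:+ x.take e) ||
          decide ("seven".toList <:+ x.take e) || decide ("eight".toList <:+ x.take e) ||
          decide ("nine".toList <:+ x.take e)) = true
      · exact pv_key _ _ _ _ _ _ _ _ _ _ _ hor
      · simp only [Bool.or_eq_true, decide_eq_true_eq, not_or] at hor
        obtain ⟨⟨⟨⟨⟨⟨⟨⟨f1, f2⟩, f3⟩, f4⟩, f5⟩, f6⟩, f7⟩, f8⟩, f9⟩ := hor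
        simp only [decide_eq_false f1, decide_eq_false f2, decide_eq_false f3, decide_eq_false f4,
          decide_eq_false f5, decide_eq_false f6, decide_eq_false f7, decide_eq_false f8,
          decide_eq_false f9]
        have hfe : List.filter (pvQ false false false false false false false false false)
            ([1,2,3,4,5,6,7,8,9] : List Int) = [] := by decide
        rw [hfe]
        simp only [Bool.false_eq_true, if_false]
        have hc2 : ((e : Int) + 1) = (((e + 1 : Nat)) : Int) := by push_cast; ring
        have hc3 : ((e : Nat) : Int) = (((e + 1 : Nat)) : Int) - 1 := by push_cast; ring
        rw [hc2, hc3]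
        refine ih (e + 1) (by omega) (by omega) ?_
        have hnum : ∀ d : Char, ('1' ≤ d ∧ d ≤ '9') → ¬ [d] <:+ x.take e := by
          intro d hdd hs
          have h' := (pv_sing_suffix x e d h1 he).mp hs
          exact hd (by rw [h']; exact hdd)
        intro p hp
        simp only [Nat.add_sub_cancel]
        fin_cases hp
        · exact pv_nohit_succ x e h1 he _ (hNo _ (by decide)) f1
        · exact pv_nohit_succ x e h1 he _ (hNo _ (by decide)) f2
        · exact pv_nohit_succ x e h1 he _ (hNo _ (by decide)) f3
        · exact pv_nohit_succ x e h1 he _ (hNo _ (by decide)) f4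
        · exact pv_nohit_succ x e h1 he _ (hNo _ (by decide)) f5
        · exact pv_nohit_succ x e h1 he _ (hNo _ (by decide)) f6
        · exact pv_nohit_succ x e h1 he _ (hNo _ (by decide)) f7
        · exact pv_nohit_succ x e h1 he _ (hNo _ (by decide)) f8
        · exact pv_nohit_succ x e h1 he _ (hNo _ (by decide)) f9
        · exact pv_nohit_succ x e h1 he _ (hNo _ (by decide)) (hnum '1' (by decide))
        · exact pv_nohit_succ x e h1 he _ (hNo _ (by decide)) (hnum '2' (by decide))
        · exact pv_nohit_succ x e h1 he _ (hNo _ (by decide)) (hnum '3' (by decide))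
        · exact pv_nohit_succ x e h1 he _ (hNo _ (by decide)) (hnum '4' (by decide))
        · exact pv_nohit_succ x e h1 he _ (hNo _ (by decide)) (hnum '5' (by decide))
        · exact pv_nohit_succ x e h1 he _ (hNo _ (by decide)) (hnum '6' (by decide))
        · exact pv_nohit_succ x e h1 he _ (hNo _ (by decide)) (hnum '7' (by decide))
        · exact pv_nohit_succ x e h1 he _ (hNo _ (by decide)) (hnum '8' (by decide))
        · exact pv_nohit_succ x e h1 he _ (hNo _ (by decide)) (hnum '9' (by decide))

theorem pv_top (xs : List Char) :
    pvALoop xs (-1) (PySem.List.pyRange 0 ((xs.length : Int) + 1) 1)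
    = pvBLoop xs (PySem.List.pyRange 1 ((xs.length : Int) + 1) 1) := by
  rw [PySem.List.pyRange_one_cons (by omega : (0 : Int) < (xs.length : Int) + 1)]
  simp only [pvALoop]
  have h0 : (-1 + 1 : Int) = ((1 : Nat) : Int) - 1 := by norm_num
  have hp : PySem.List.slice xs (some 0) (some (-1 + 1)) = [] := by
    rw [show (-1 + 1 : Int) = ((0 : Nat) : Int) by norm_num, PySem.List.slice_zero_start,
      PySem.List.slice_to_natCast, List.take_zero]
  rw [hp]
  simp only [show PySem.List.pyGetD digitsl 0 [] = "one".toList from rfl,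
    show PySem.List.pyGetD digitsl 1 [] = "two".toList from rfl,
    show PySem.List.pyGetD digitsl 2 [] = "three".toList from rfl,
    show PySem.List.pyGetD digitsl 3 [] = "four".toList from rfl,
    show PySem.List.pyGetD digitsl 4 [] = "five".toList from rfl,
    show PySem.List.pyGetD digitsl 5 [] = "six".toList from rfl,
    show PySem.List.pyGetD digitsl 6 [] = "seven".toList from rfl,
    show PySem.List.pyGetD digitsl 7 [] = "eight".toList from rfl,
    show PySem.List.pyGetD digitsl 8 [] = "nine".toList from rfl,
    show PySem.List.pyGetD digitsn 0 [] = ['1'] from rfl,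
    show PySem.List.pyGetD digitsn 1 [] = ['2'] from rfl,
    show PySem.List.pyGetD digitsn 2 [] = ['3'] from rfl,
    show PySem.List.pyGetD digitsn 3 [] = ['4'] from rfl,
    show PySem.List.pyGetD digitsn 4 [] = ['5'] from rfl,
    show PySem.List.pyGetD digitsn 5 [] = ['6'] from rfl,
    show PySem.List.pyGetD digitsn 6 [] = ['7'] from rfl,
    show PySem.List.pyGetD digitsn 7 [] = ['8'] from rfl,
    show PySem.List.pyGetD digitsn 8 [] = ['9'] from rfl,
    show PySem.Chars.isIn "one".toList [] = false from by decide,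
    show PySem.Chars.isIn "two".toList [] = false from by decide,
    show PySem.Chars.isIn "three".toList [] = false from by decide,
    show PySem.Chars.isIn "four".toList [] = false from by decide,
    show PySem.Chars.isIn "five".toList [] = false from by decide,
    show PySem.Chars.isIn "six".toList [] = false from by decide,
    show PySem.Chars.isIn "seven".toList [] = false from by decide,
    show PySem.Chars.isIn "eight".toList [] = false from by decide,
    show PySem.Chars.isIn "nine".toList [] = false from by decide,
    show PySem.Chars.isIn ['1'] [] = false from by decide,
    show PySem.Chars.isIn ['2'] [] = false from by decide,
    show PySem.Chars.isIn ['3'] [] = false from by decide,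
    show PySem.Chars.isIn ['4'] [] = false from by decide,
    show PySem.Chars.isIn ['5'] [] = false from by decide,
    show PySem.Chars.isIn ['6'] [] = false from by decide,
    show PySem.Chars.isIn ['7'] [] = false from by decide,
    show PySem.Chars.isIn ['8'] [] = false from by decide,
    show PySem.Chars.isIn ['9'] [] = false from by decide,
    Bool.or_self, Bool.false_eq_true, if_false]
  rw [h0, show (0 + 1 : Int) = ((1 : Nat) : Int) by norm_num]
  refine pv_main xs xs.length 1 (by omega) (by omega) ?_
  intro p hp h
  rw [show (1 : Nat) - 1 = 0 from rfl, List.take_zero] at h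
  have hpnil : p = [] := by simpa using h
  subst hpnil
  exact absurd hp (by decide)

-- ===== VERDICT (by name: the statement is the Claim_ definition above) =====
theorem istnumericV_spec : Claim_equal_istnumericV := by
  intro x _
  unfold Spec_istnumericV istnumericV istnumericV_alt
  exact pv_top x.toList
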